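-- pv_equiv track=rewrite | github.com/Kehet/jetbrains-academy | dominoes.py | best_doubles
-- ===== SOURCE A (Python) =====
-- def best_doubles(hand):
--     best_value = None
--     best_index = None
--
--     for index, piece in enumerate(hand):
--         if piece[0] == piece[1]:
--             if best_value is None or piece[0] > best_value:
--                 best_value = piece[0]
--                 best_index = index
--
--     return best_value, best_index
-- ===== SOURCE B (Python) =====
-- def best_doubles(hand):
--     doubles = sorted(((p[0], i) for i, p in enumerate(hand) if p[0] == p[1]),
--                      key=lambda c: c[0], reverse=True)
--     if not doubles:
--         return None, None
--     return doubles[0]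
-- ===== Notes on version B (the rewrite author's own statement) =====
-- stated objective: alternative
-- what changed: Replaces the fused best-tracking loop with sort-then-pick: collect (value, index) pairs of doubles, sort them descending by value (Python's stable sort keeps the earliest index first among equal values, matching A's tie-break) and return the first element.
import Mathlib
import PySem

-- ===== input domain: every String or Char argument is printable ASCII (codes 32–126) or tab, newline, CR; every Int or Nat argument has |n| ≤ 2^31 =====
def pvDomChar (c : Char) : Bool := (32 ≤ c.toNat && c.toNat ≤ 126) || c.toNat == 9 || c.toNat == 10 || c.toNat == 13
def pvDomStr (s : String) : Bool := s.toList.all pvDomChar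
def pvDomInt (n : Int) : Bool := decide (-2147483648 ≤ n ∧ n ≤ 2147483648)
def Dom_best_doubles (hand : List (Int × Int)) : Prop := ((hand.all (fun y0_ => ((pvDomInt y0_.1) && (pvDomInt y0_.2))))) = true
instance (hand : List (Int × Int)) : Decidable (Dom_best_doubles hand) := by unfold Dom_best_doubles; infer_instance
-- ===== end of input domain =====

-- B replaces A's fused best-tracking loop by sort-then-pick: collect double candidates, sort descending by value (stable), take the first — an alternative algorithm of similar size.


-- ===== PORT A =====
-- A: one fold over enumerate(hand), tracking (best_value, best_index) as Options.
def best_doubles (hand : List (Int × Int)) : Option Int × Option Int :=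
  (PySem.List.enumerate hand).foldl
    (fun st ip =>
      if ip.2.1 = ip.2.2 then
        match st.1 with
        | none => (some ip.2.1, some ip.1)
        | some bv => if bv < ip.2.1 then (some ip.2.1, some ip.1) else st
      else st)
    (none, none)

-- ===== PORT B =====
-- B: collect (value, index) pairs of doubles, sort them descending by value (stable sort), return the first.
def best_doubles_alt (hand : List (Int × Int)) : Option Int × Option Int :=
  let doubles := PySem.List.sorted
    ((PySem.List.enumerate hand).filterMap
      (fun ip => if ip.2.1 = ip.2.2 then some (ip.2.1, ip.1) else none))
    (fun c => c.1) true
  match doubles with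
  | [] => (none, none)
  | c :: _ => (some c.1, some c.2)

-- ===== PRECONDITION & SPEC =====
def Spec_best_doubles (hand : List (Int × Int)) (out : Option Int × Option Int) : Prop := out = best_doubles_alt hand
instance (hand : List (Int × Int)) (out : Option Int × Option Int) : Decidable (Spec_best_doubles hand out) := by unfold Spec_best_doubles; infer_instance

-- ===== CLAIM (what is proved, stated in full; the proofs are below) =====
def Claim_equal_best_doubles : Prop := ∀ (hand : List (Int × Int)), Dom_best_doubles hand → Spec_best_doubles hand (best_doubles hand)

-- ===== LEMMAS AND PROOFS =====

-- A's loop body.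
def pvStepA (st : Option Int × Option Int) (ip : Int × (Int × Int)) : Option Int × Option Int :=
  if ip.2.1 = ip.2.2 then
    match st.1 with
    | none => (some ip.2.1, some ip.1)
    | some bv => if bv < ip.2.1 then (some ip.2.1, some ip.1) else st
  else st

-- B's comprehension filter.
def pvF (ip : Int × (Int × Int)) : Option (Int × Int) :=
  if ip.2.1 = ip.2.2 then some (ip.2.1, ip.1) else none

-- the insertBy comparator of the reverse sort keyed on the value
def pvBefore (a b : Int × Int) : Bool := decide (b.1 < a.1)

-- one step of the sort's foldl (over the unfiltered enumerate list)
def pvStepS (acc : List (Int × Int)) (ip : Int × (Int × Int)) : List (Int × Int) :=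
  match pvF ip with
  | some c => PySem.List.insertBy pvBefore c acc
  | none => acc

-- A's Option-pair state corresponds to the head of the sort accumulator.
def pvConv (acc : List (Int × Int)) : Option Int × Option Int :=
  match acc with
  | [] => (none, none)
  | c :: _ => (some c.1, some c.2)

theorem pvStep_rel (acc : List (Int × Int)) (ip : Int × (Int × Int)) :
    pvStepA (pvConv acc) ip = pvConv (pvStepS acc ip) := by
  by_cases h : ip.2.1 = ip.2.2
  · cases acc with
    | nil => simp [pvStepA, pvStepS, pvF, pvConv, h, PySem.List.insertBy]
    | cons y ys =>
      by_cases h2 : y.1 < ip.2.2 <;>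
        simp [pvStepA, pvStepS, pvF, pvConv, pvBefore, h, h2, PySem.List.insertBy]
  · simp [pvStepA, pvStepS, pvF, h]

-- The two folds over the same enumerate list stay related by pvConv.
theorem pvFold_rel (l : List (Int × (Int × Int))) (acc : List (Int × Int)) :
    l.foldl pvStepA (pvConv acc) = pvConv (l.foldl pvStepS acc) := by
  induction l generalizing acc with
  | nil => rfl
  | cons ip t ih => rw [List.foldl_cons, List.foldl_cons, pvStep_rel]; exact ih _

-- sorting the filterMap = folding pvStepS over the enumerate list itself.
theorem pvSortFilterMap (l : List (Int × (Int × Int))) (acc : List (Int × Int)) :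
    (l.filterMap pvF).foldl (fun a x => PySem.List.insertBy pvBefore x a) acc = l.foldl pvStepS acc := by
  induction l generalizing acc with
  | nil => rfl
  | cons ip t ih => cases hf : pvF ip <;> simp [hf, pvStepS, ih]

-- ===== VERDICT (by name: the statement is the Claim_ definition above) =====
theorem best_doubles_spec : Claim_equal_best_doubles := by
  intro hand _
  show best_doubles hand = best_doubles_alt hand
  have hA : best_doubles hand = (PySem.List.enumerate hand).foldl pvStepA (pvConv []) := by
    unfold best_doubles; congr 1
  have hB : best_doubles_alt hand
      = pvConv (((PySem.List.enumerate hand).filterMap pvF).foldl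
          (fun a x => PySem.List.insertBy pvBefore x a) []) := by
    show (match PySem.List.sorted ((PySem.List.enumerate hand).filterMap pvF) (fun c => c.1) true with
          | [] => ((none : Option Int), (none : Option Int))
          | c :: _ => (some c.1, some c.2)) = _
    rw [PySem.List.sorted_rev_eq_foldl_insertBy]
    have : (fun (acc : List (Int × Int)) (x : Int × Int) =>
        PySem.List.insertBy (fun a b => decide (b.1 < a.1)) x acc)
        = fun a x => PySem.List.insertBy pvBefore x a := rfl
    rw [this]
    cases ((PySem.List.enumerate hand).filterMap pvF).foldl
        (fun a x => PySem.List.insertBy pvBefore x a) [] <;> rfl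
  rw [hA, hB, pvSortFilterMap]
  exact pvFold_rel (PySem.List.enumerate hand) []
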